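-- pv_equiv track=rewrite | github.com/Alexsovich5/DAPP | python-backend/app/services/ai_matching.py | are_complementary_traits
-- ===== SOURCE A (Python) =====
-- def are_complementary_traits(trait1: str, trait2: str) -> bool:
--     """Check if two personality traits are complementary"""
--     complementary_pairs = [
--         ('introverted', 'extroverted'),
--         ('spontaneous', 'organized'),
--         ('creative', 'analytical'),
--         ('adventurous', 'homebody'),
--         ('emotional', 'logical')
--     ]
--
--     trait1_lower = trait1.lower()
--     trait2_lower = trait2.lower()
--
--     for pair in complementary_pairs:
--         if (trait1_lower in pair and trait2_lower in pair and trait1_lower != trait2_lower):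
--             return True
--
--     return False
-- ===== SOURCE B (Python) =====
-- def are_complementary_traits(trait1: str, trait2: str) -> bool:
--     """Check if two personality traits are complementary"""
--     # Traits are numbered so that complementary partners get ids 2k and 2k+1;
--     # two traits are complementary iff both are known and their ids differ
--     # exactly in the lowest bit, i.e. i ^ j == 1.
--     trait_id = {
--         'introverted': 0, 'extroverted': 1,
--         'spontaneous': 2, 'organized': 3,
--         'creative': 4, 'analytical': 5,
--         'adventurous': 6, 'homebody': 7,
--         'emotional': 8, 'logical': 9,
--     }
--     i = trait_id.get(trait1.lower())
--     j = trait_id.get(trait2.lower())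
--     return i is not None and j is not None and i ^ j == 1
-- ===== Notes on version B (the rewrite author's own statement) =====
-- stated objective: alternative
-- what changed: Replaced the pair-table scan by a numeric encoding: each trait is mapped to an integer id with partners numbered 2k and 2k+1, and complementarity is decided arithmetically by the bitwise test i ^ j == 1 (which also subsumes the inequality guard, since x ^ x == 0).
import Mathlib
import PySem

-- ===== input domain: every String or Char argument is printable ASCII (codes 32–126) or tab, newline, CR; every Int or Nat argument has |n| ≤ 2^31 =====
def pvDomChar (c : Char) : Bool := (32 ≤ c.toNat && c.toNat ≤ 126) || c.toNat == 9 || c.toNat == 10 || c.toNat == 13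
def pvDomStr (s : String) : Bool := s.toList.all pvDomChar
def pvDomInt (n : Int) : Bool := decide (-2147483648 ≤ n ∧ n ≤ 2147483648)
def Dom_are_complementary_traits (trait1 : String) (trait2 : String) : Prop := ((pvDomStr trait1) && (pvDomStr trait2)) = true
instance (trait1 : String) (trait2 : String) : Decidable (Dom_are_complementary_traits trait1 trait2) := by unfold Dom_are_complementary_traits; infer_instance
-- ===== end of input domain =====

-- B replaces A's scan over complementary pairs by a numeric encoding: partners get ids 2k and
-- 2k+1 and complementarity is the bitwise test i ^ j == 1 (alternative; same behaviour).

-- ===== PORT A =====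
def pvPairsA : List (String × String) :=
  [("introverted", "extroverted"),
   ("spontaneous", "organized"),
   ("creative", "analytical"),
   ("adventurous", "homebody"),
   ("emotional", "logical")]

-- the for-loop with early return True, else False
def pvLoopA (a b : String) : List (String × String) → Bool
  | [] => false
  | p :: rest =>
      if ((a == p.1 || a == p.2) && (b == p.1 || b == p.2) && a != b) then true
      else pvLoopA a b rest

def are_complementary_traits (trait1 : String) (trait2 : String) : Bool :=
  pvLoopA (PySem.Str.lower trait1) (PySem.Str.lower trait2) pvPairsA

-- ===== PORT B =====
def pvTraitId : PySem.Dict String Int :=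
  PySem.Dict.ofList
    [("introverted", 0), ("extroverted", 1),
     ("spontaneous", 2), ("organized", 3),
     ("creative", 4), ("analytical", 5),
     ("adventurous", 6), ("homebody", 7),
     ("emotional", 8), ("logical", 9)]

def are_complementary_traits_alt (trait1 : String) (trait2 : String) : Bool :=
  -- i is not None and j is not None and i ^ j == 1
  match PySem.Dict.get? pvTraitId (PySem.Str.lower trait1),
        PySem.Dict.get? pvTraitId (PySem.Str.lower trait2) with
  | some i, some j => PySem.Int.bxor i j == 1
  | _, _ => false

-- ===== PRECONDITION & SPEC =====
def Spec_are_complementary_traits (trait1 : String) (trait2 : String) (out : Bool) : Prop := out = are_complementary_traits_alt trait1 trait2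
instance (trait1 : String) (trait2 : String) (out : Bool) : Decidable (Spec_are_complementary_traits trait1 trait2 out) := by unfold Spec_are_complementary_traits; infer_instance

-- ===== CLAIM (what is proved, stated in full; the proofs are below) =====
def Claim_equal_are_complementary_traits : Prop := ∀ (trait1 : String) (trait2 : String), Dom_are_complementary_traits trait1 trait2 → Spec_are_complementary_traits trait1 trait2 (are_complementary_traits trait1 trait2)

-- ===== LEMMAS AND PROOFS =====

theorem getI (a : String) :
    PySem.Dict.get? pvTraitId a =
      (if "introverted" = a then some 0 else if "extroverted" = a then some 1 else if "spontaneous" = a then some 2 else if "organized" = a then some 3 else if "creative" = a then some 4 else if "analytical" = a then some 5 else if "adventurous" = a then some 6 else if "homebody" = a then some 7 else if "emotional" = a then some 8 else if "logical" = a then some 9 else none) := by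
  have hmk : pvTraitId = PySem.Dict.mk
      [("introverted", 0), ("extroverted", 1),
       ("spontaneous", 2), ("organized", 3),
       ("creative", 4), ("analytical", 5),
       ("adventurous", 6), ("homebody", 7),
       ("emotional", 8), ("logical", 9)] := by rfl
  rw [hmk]
  simp only [PySem.Dict.get?_mk_cons, beq_iff_eq]
  rfl

-- for a fixed id i, the B-side inner match over b's lookup is a plain comparison of b
-- with the partner string of i
set_option maxHeartbeats 1000000 in
theorem rhsKey (b : String) (i : Int) (p : String)
    (hp : (if "introverted" = b then (PySem.Int.bxor i 0 == 1) else if "extroverted" = b then (PySem.Int.bxor i 1 == 1) else if "spontaneous" = b then (PySem.Int.bxor i 2 == 1) else if "organized" = b then (PySem.Int.bxor i 3 == 1) else if "creative" = b then (PySem.Int.bxor i 4 == 1) else if "analytical" = b then (PySem.Int.bxor i 5 == 1) else if "adventurous" = b then (PySem.Int.bxor i 6 == 1) else if "homebody" = b then (PySem.Int.bxor i 7 == 1) else if "emotional" = b then (PySem.Int.bxor i 8 == 1) else if "logical" = b then (PySem.Int.bxor i 9 == 1) else false) = (p == b)) :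
    (match PySem.Dict.get? pvTraitId b with
     | some j => (PySem.Int.bxor i j == 1)
     | none => false) = (p == b) := by
  rw [getI]
  rw [← hp]
  split_ifs <;> rfl

theorem matchFst (i : Int) (o : Option Int) :
    (match some i, o with
     | some i, some j => PySem.Int.bxor i j == 1
     | _, _ => false)
    = (match o with
       | some j => PySem.Int.bxor i j == 1
       | none => false) := by
  cases o <;> rfl

theorem matchNoneFst (o : Option Int) :
    (match (none : Option Int), o with
     | some i, some j => PySem.Int.bxor i j == 1
     | _, _ => false) = false := by
  cases o <;> rfl

set_option maxHeartbeats 4000000 in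
theorem pvKey (a b : String) :
    pvLoopA a b pvPairsA =
      (match PySem.Dict.get? pvTraitId a, PySem.Dict.get? pvTraitId b with
       | some i, some j => PySem.Int.bxor i j == 1
       | _, _ => false) := by
  by_cases h1 : a = "introverted"
  · subst h1
    rw [show (PySem.Dict.get? pvTraitId "introverted") = some (0:Int) from rfl]
    rw [matchFst]
    rw [rhsKey b 0 "extroverted" (by split_ifs <;> first | (subst_vars; decide) | simp_all)]
    by_cases hb : b = "extroverted"
    · simp [pvLoopA, pvPairsA, hb]
    · by_cases hb2 : b = "introverted"
      · simp [pvLoopA, pvPairsA, hb2]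
      · simp [pvLoopA, pvPairsA, hb, hb2, Ne.symm hb]
  by_cases h2 : a = "extroverted"
  · subst h2
    rw [show (PySem.Dict.get? pvTraitId "extroverted") = some (1:Int) from rfl]
    rw [matchFst]
    rw [rhsKey b 1 "introverted" (by split_ifs <;> first | (subst_vars; decide) | simp_all)]
    by_cases hb : b = "introverted"
    · simp [pvLoopA, pvPairsA, hb]
    · by_cases hb2 : b = "extroverted"
      · simp [pvLoopA, pvPairsA, hb2]
      · simp [pvLoopA, pvPairsA, hb, hb2, Ne.symm hb]
  by_cases h3 : a = "spontaneous"
  · subst h3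
    rw [show (PySem.Dict.get? pvTraitId "spontaneous") = some (2:Int) from rfl]
    rw [matchFst]
    rw [rhsKey b 2 "organized" (by split_ifs <;> first | (subst_vars; decide) | simp_all)]
    by_cases hb : b = "organized"
    · simp [pvLoopA, pvPairsA, hb]
    · by_cases hb2 : b = "spontaneous"
      · simp [pvLoopA, pvPairsA, hb2]
      · simp [pvLoopA, pvPairsA, hb, hb2, Ne.symm hb]
  by_cases h4 : a = "organized"
  · subst h4
    rw [show (PySem.Dict.get? pvTraitId "organized") = some (3:Int) from rfl]
    rw [matchFst]
    rw [rhsKey b 3 "spontaneous" (by split_ifs <;> first | (subst_vars; decide) | simp_all)]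
    by_cases hb : b = "spontaneous"
    · simp [pvLoopA, pvPairsA, hb]
    · by_cases hb2 : b = "organized"
      · simp [pvLoopA, pvPairsA, hb2]
      · simp [pvLoopA, pvPairsA, hb, hb2, Ne.symm hb]
  by_cases h5 : a = "creative"
  · subst h5
    rw [show (PySem.Dict.get? pvTraitId "creative") = some (4:Int) from rfl]
    rw [matchFst]
    rw [rhsKey b 4 "analytical" (by split_ifs <;> first | (subst_vars; decide) | simp_all)]
    by_cases hb : b = "analytical"
    · simp [pvLoopA, pvPairsA, hb]
    · by_cases hb2 : b = "creative"
      · simp [pvLoopA, pvPairsA, hb2]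
      · simp [pvLoopA, pvPairsA, hb, hb2, Ne.symm hb]
  by_cases h6 : a = "analytical"
  · subst h6
    rw [show (PySem.Dict.get? pvTraitId "analytical") = some (5:Int) from rfl]
    rw [matchFst]
    rw [rhsKey b 5 "creative" (by split_ifs <;> first | (subst_vars; decide) | simp_all)]
    by_cases hb : b = "creative"
    · simp [pvLoopA, pvPairsA, hb]
    · by_cases hb2 : b = "analytical"
      · simp [pvLoopA, pvPairsA, hb2]
      · simp [pvLoopA, pvPairsA, hb, hb2, Ne.symm hb]
  by_cases h7 : a = "adventurous"
  · subst h7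
    rw [show (PySem.Dict.get? pvTraitId "adventurous") = some (6:Int) from rfl]
    rw [matchFst]
    rw [rhsKey b 6 "homebody" (by split_ifs <;> first | (subst_vars; decide) | simp_all)]
    by_cases hb : b = "homebody"
    · simp [pvLoopA, pvPairsA, hb]
    · by_cases hb2 : b = "adventurous"
      · simp [pvLoopA, pvPairsA, hb2]
      · simp [pvLoopA, pvPairsA, hb, hb2, Ne.symm hb]
  by_cases h8 : a = "homebody"
  · subst h8
    rw [show (PySem.Dict.get? pvTraitId "homebody") = some (7:Int) from rfl]
    rw [matchFst]
    rw [rhsKey b 7 "adventurous" (by split_ifs <;> first | (subst_vars; decide) | simp_all)]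
    by_cases hb : b = "adventurous"
    · simp [pvLoopA, pvPairsA, hb]
    · by_cases hb2 : b = "homebody"
      · simp [pvLoopA, pvPairsA, hb2]
      · simp [pvLoopA, pvPairsA, hb, hb2, Ne.symm hb]
  by_cases h9 : a = "emotional"
  · subst h9
    rw [show (PySem.Dict.get? pvTraitId "emotional") = some (8:Int) from rfl]
    rw [matchFst]
    rw [rhsKey b 8 "logical" (by split_ifs <;> first | (subst_vars; decide) | simp_all)]
    by_cases hb : b = "logical"
    · simp [pvLoopA, pvPairsA, hb]
    · by_cases hb2 : b = "emotional"
      · simp [pvLoopA, pvPairsA, hb2]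
      · simp [pvLoopA, pvPairsA, hb, hb2, Ne.symm hb]
  by_cases h10 : a = "logical"
  · subst h10
    rw [show (PySem.Dict.get? pvTraitId "logical") = some (9:Int) from rfl]
    rw [matchFst]
    rw [rhsKey b 9 "emotional" (by split_ifs <;> first | (subst_vars; decide) | simp_all)]
    by_cases hb : b = "emotional"
    · simp [pvLoopA, pvPairsA, hb]
    · by_cases hb2 : b = "logical"
      · simp [pvLoopA, pvPairsA, hb2]
      · simp [pvLoopA, pvPairsA, hb, hb2, Ne.symm hb]
  have ha : PySem.Dict.get? pvTraitId a = none := by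
    rw [getI]; simp [Ne.symm h1, Ne.symm h2, Ne.symm h3, Ne.symm h4, Ne.symm h5, Ne.symm h6, Ne.symm h7, Ne.symm h8, Ne.symm h9, Ne.symm h10]
  rw [ha, matchNoneFst (PySem.Dict.get? pvTraitId b)]
  simp [pvLoopA, pvPairsA, h1, h2, h3, h4, h5, h6, h7, h8, h9, h10]

-- ===== VERDICT (by name: the statement is the Claim_ definition above) =====
theorem are_complementary_traits_spec : Claim_equal_are_complementary_traits := by
  intro t1 t2 _
  unfold Spec_are_complementary_traits are_complementary_traits are_complementary_traits_alt
  exact pvKey (PySem.Str.lower t1) (PySem.Str.lower t2)
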